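-- pv_equiv track=rewrite | github.com/skyoxu/wowguaji | scripts/python/normalize_overlays.py | strip_section
-- ===== SOURCE A (Python) =====
-- def strip_section(body: str, header: str) -> tuple[str, bool]:
--     """
--     Remove a top-level (## ...) section by exact header line.
--
--     Removes from the header line up to (but not including) the next '## ' header,
--     or end of file.
--     """
--
--     lines = body.splitlines(keepends=True)
--     start = None
--     for i, l in enumerate(lines):
--         if l.strip() == header:
--             start = i
--             break
--     if start is None:
--         return body, False
--
--     end = len(lines)
--     for j in range(start + 1, len(lines)):
--         if lines[j].startswith("## "):
--             end = j
--             break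
--     new_body = "".join(lines[:start] + lines[end:]).lstrip("\n")
--     return new_body, True
-- ===== SOURCE B (Python) =====
-- def strip_section(body: str, header: str) -> tuple[str, bool]:
--     found = False
--     removing = False
--     out = []
--     for line in body.splitlines(keepends=True):
--         if not found and line.strip() == header:
--             found = True
--             removing = True
--         elif removing and line.startswith("## "):
--             removing = False
--             out.append(line)
--         elif removing:
--             pass
--         else:
--             out.append(line)
--     if not found:
--         return body, False
--     return "".join(out).lstrip("\n"), True
-- ===== Notes on version B (the rewrite author's own statement) =====
-- stated objective: simpler
-- what changed: Replaces A's two index-based scans (find start index, then find end index) followed by list slicing and rejoining with a single pass over the lines that maintains found/removing flags and an output accumulator.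
import Mathlib
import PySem

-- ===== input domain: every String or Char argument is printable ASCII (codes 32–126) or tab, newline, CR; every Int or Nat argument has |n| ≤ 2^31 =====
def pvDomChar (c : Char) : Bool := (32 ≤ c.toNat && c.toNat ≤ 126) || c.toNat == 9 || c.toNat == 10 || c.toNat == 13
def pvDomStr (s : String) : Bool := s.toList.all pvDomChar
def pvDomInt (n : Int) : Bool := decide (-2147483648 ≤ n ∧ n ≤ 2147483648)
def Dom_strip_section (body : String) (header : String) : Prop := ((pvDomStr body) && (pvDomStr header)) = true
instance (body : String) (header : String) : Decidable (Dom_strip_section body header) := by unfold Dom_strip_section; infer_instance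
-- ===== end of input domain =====

-- B replaces A's two index-based scans plus list slicing by one pass over the lines
-- with found/removing flags and an output accumulator (objective: simpler decomposition, same cost).

-- shared exact ports of the Python builtins both versions call:
-- body.splitlines(keepends=True): exact on Dom (only '\n', '\r', '\r\n' line boundaries occur there)
def pvSplitLinesKeep (acc : List Char) : List Char → List (List Char)
  | [] => if acc = [] then [] else [acc.reverse]
  | '\r' :: '\n' :: rest => (acc.reverse ++ ['\r', '\n']) :: pvSplitLinesKeep [] rest
  | '\r' :: rest => (acc.reverse ++ ['\r']) :: pvSplitLinesKeep [] rest
  | '\n' :: rest => (acc.reverse ++ ['\n']) :: pvSplitLinesKeep [] rest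
  | c :: rest => pvSplitLinesKeep (c :: acc) rest
  termination_by l => l.length

-- s.lstrip("\n"): exact (drop leading '\n' characters)
def pvLstripNl (cs : List Char) : List Char := cs.dropWhile (· == '\n')

-- ===== PORT A =====
-- first loop of A: index of the first line whose .strip() equals the header
def aFindStart (header : List Char) : List (List Char) → Option Nat
  | [] => none
  | l :: rest =>
      if PySem.Chars.strip l = header then some 0
      else (aFindStart header rest).map (· + 1)

-- second loop of A, run on lines[start+1:]: offset of the first line starting with "## "
def aFindEnd : List (List Char) → Option Nat
  | [] => none
  | l :: rest =>
      if PySem.Chars.startswith l ['#', '#', ' '] then some 0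
      else (aFindEnd rest).map (· + 1)

def strip_section (body : String) (header : String) : String × Bool :=
  let lines := pvSplitLinesKeep [] body.toList
  match aFindStart header.toList lines with
  | none => (body, false)
  | some start =>
      let e := match aFindEnd (lines.drop (start + 1)) with
               | none => lines.length
               | some k => start + 1 + k
      (String.ofList (pvLstripNl (PySem.Chars.join [] (lines.take start ++ lines.drop e))), true)

-- ===== PORT B =====
def bGo (header : List Char) (found removing : Bool) (out : List (List Char)) :
    List (List Char) → Bool × List (List Char)
  | [] => (found, out)
  | l :: rest =>
      if !found && PySem.Chars.strip l = header then bGo header true true out rest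
      else if removing && PySem.Chars.startswith l ['#', '#', ' '] then
        bGo header found false (out ++ [l]) rest
      else if removing then bGo header found removing out rest
      else bGo header found removing (out ++ [l]) rest

def strip_section_alt (body : String) (header : String) : String × Bool :=
  let r := bGo header.toList false false [] (pvSplitLinesKeep [] body.toList)
  if r.1 then (String.ofList (pvLstripNl (PySem.Chars.join [] r.2)), true) else (body, false)

-- ===== PRECONDITION & SPEC =====
def Spec_strip_section (body : String) (header : String) (out : String × Bool) : Prop := out = strip_section_alt body header
instance (body : String) (header : String) (out : String × Bool) : Decidable (Spec_strip_section body header out) := by unfold Spec_strip_section; infer_instance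

-- ===== CLAIM (what is proved, stated in full; the proofs are below) =====
def Claim_equal_strip_section : Prop := ∀ (body : String) (header : String), Dom_strip_section body header → Spec_strip_section body header (strip_section body header)

-- ===== LEMMAS AND PROOFS =====

-- A's suffix lines[end:] relative to the scanned suffix
def dropToEnd (l : List (List Char)) : List (List Char) :=
  match aFindEnd l with
  | none => []
  | some k => l.drop k

theorem aFindEnd_cons (x : List Char) (rest : List (List Char)) :
    aFindEnd (x :: rest) =
      if PySem.Chars.startswith x ['#', '#', ' '] = true then some 0
      else (aFindEnd rest).map (· + 1) := rfl

theorem aFindStart_cons (header x : List Char) (rest : List (List Char)) :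
    aFindStart header (x :: rest) =
      if PySem.Chars.strip x = header then some 0
      else (aFindStart header rest).map (· + 1) := rfl

theorem dropToEnd_cons (x : List Char) (rest : List (List Char)) :
    dropToEnd (x :: rest) =
      if PySem.Chars.startswith x ['#', '#', ' '] = true then x :: rest else dropToEnd rest := by
  rw [dropToEnd, aFindEnd_cons]
  by_cases hs : PySem.Chars.startswith x ['#', '#', ' '] = true
  · rw [if_pos hs, if_pos hs]; rfl
  · rw [if_neg hs, if_neg hs]
    cases h : aFindEnd rest with
    | none => simp [dropToEnd, h]
    | some k => simp [dropToEnd, h]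

theorem bGo_done (header : List Char) (out : List (List Char)) (l : List (List Char)) :
    bGo header true false out l = (true, out ++ l) := by
  induction l generalizing out with
  | nil => simp [bGo]
  | cons x rest ih => simp [bGo, ih]

theorem bGo_removing (header : List Char) (out : List (List Char)) (l : List (List Char)) :
    bGo header true true out l = (true, out ++ dropToEnd l) := by
  induction l generalizing out with
  | nil => simp [bGo, dropToEnd, aFindEnd]
  | cons x rest ih =>
    by_cases hs : PySem.Chars.startswith x ['#', '#', ' '] = true
    · simp [bGo, hs, bGo_done, dropToEnd_cons]
    · simp [bGo, hs, ih, dropToEnd_cons]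

theorem bGo_notfound (header : List Char) (out : List (List Char)) (l : List (List Char))
    (h : aFindStart header l = none) :
    bGo header false false out l = (false, out ++ l) := by
  induction l generalizing out with
  | nil => simp [bGo]
  | cons x rest ih =>
    rw [aFindStart_cons] at h
    by_cases hx : PySem.Chars.strip x = header
    · rw [if_pos hx] at h; exact absurd h (by simp)
    · rw [if_neg hx, Option.map_eq_none_iff] at h
      simp [bGo, hx, ih _ h]

theorem bGo_found (header : List Char) (l : List (List Char)) (s : Nat)
    (h : aFindStart header l = some s) (out : List (List Char)) :
    bGo header false false out l =
      (true, out ++ l.take s ++ dropToEnd (l.drop (s + 1))) := by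
  induction l generalizing out s with
  | nil => simp [aFindStart] at h
  | cons x rest ih =>
    rw [aFindStart_cons] at h
    by_cases hx : PySem.Chars.strip x = header
    · rw [if_pos hx] at h
      injection h with h
      subst h
      simp [bGo, hx, bGo_removing]
    · rw [if_neg hx, Option.map_eq_some_iff] at h
      obtain ⟨s', hs', rfl⟩ := h
      simp [bGo, hx, ih _ hs', List.append_assoc]

theorem drop_eq_dropToEnd (l : List (List Char)) (s : Nat) :
    l.drop (match aFindEnd (l.drop (s + 1)) with
            | none => l.length
            | some k => s + 1 + k) = dropToEnd (l.drop (s + 1)) := by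
  cases h : aFindEnd (l.drop (s + 1)) with
  | none => simp [dropToEnd, h, List.drop_eq_nil_of_le]
  | some k =>
    simp only [dropToEnd, h, List.drop_drop]

-- ===== VERDICT (by name: the statement is the Claim_ definition above) =====
theorem strip_section_spec : Claim_equal_strip_section := by
  intro body header _
  unfold Spec_strip_section strip_section strip_section_alt
  cases h : aFindStart header.toList (pvSplitLinesKeep [] body.toList) with
  | none => simp [h, bGo_notfound _ _ _ h]
  | some s => simp [h, bGo_found _ _ _ h, drop_eq_dropToEnd]
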